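-- pv_equiv track=rewrite | github.com/Avenr777/PulseIQ | myapp/ml_models.py | parse_model_filename
-- ===== SOURCE A (Python) =====
-- READING_TYPES = (
--     "power_w",
--     "voltage",
--     "current_a",
--     "energy_kwh",
--     "power_factor",
-- )
--
-- def parse_model_filename(filename):
--     if not filename.endswith("_model.pkl"):
--         return None, None
--
--     base_name = filename.replace("_model.pkl", "")
--
--     for reading_type in sorted(READING_TYPES, key=len, reverse=True):
--         suffix = f"_{reading_type}"
--         if base_name.endswith(suffix):
--             asset_name = base_name[: -len(suffix)]
--             return asset_name, reading_type
--
--     return None, None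
-- ===== SOURCE B (Python) =====
-- TYPE_BY_LAST_CHAR = {
--     "w": "power_w",
--     "e": "voltage",
--     "a": "current_a",
--     "h": "energy_kwh",
--     "r": "power_factor",
-- }
--
-- def parse_model_filename(filename):
--     if not filename.endswith("_model.pkl"):
--         return None, None
--     base = filename.replace("_model.pkl", "")
--     rt = TYPE_BY_LAST_CHAR.get(base[-1]) if base else None
--     if rt is not None and base.endswith("_" + rt):
--         return base[: -len(rt) - 1], rt
--     return None, None
-- ===== Notes on version B (the rewrite author's own statement) =====
-- stated objective: alternative
-- what changed: A's loop over the length-sorted reading types with repeated endswith checks is replaced by a dict dispatch on the last character of the trimmed base name (each reading type ends in a distinct character) followed by a single suffix check.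
import Mathlib
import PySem

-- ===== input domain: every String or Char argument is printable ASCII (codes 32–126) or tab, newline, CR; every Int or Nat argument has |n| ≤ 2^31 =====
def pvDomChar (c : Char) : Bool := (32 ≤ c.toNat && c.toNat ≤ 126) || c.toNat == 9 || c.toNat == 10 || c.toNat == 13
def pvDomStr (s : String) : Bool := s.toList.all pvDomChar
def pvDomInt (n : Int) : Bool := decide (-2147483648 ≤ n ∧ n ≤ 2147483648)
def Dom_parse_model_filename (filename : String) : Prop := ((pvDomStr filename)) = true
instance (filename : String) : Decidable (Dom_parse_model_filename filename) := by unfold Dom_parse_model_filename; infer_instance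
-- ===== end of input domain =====

-- B replaces A's loop over the length-sorted reading types by a dict dispatch on the
-- last character of the trimmed name (each reading type ends in a distinct character)
-- followed by a single suffix check; same return value everywhere (objective: alternative).

-- ===== PORT A =====
def pmfReadingTypes : List (List Char) :=
  ["power_w".toList, "voltage".toList, "current_a".toList, "energy_kwh".toList, "power_factor".toList]

def pmfLoop (base : List Char) : List (List Char) → Option String × Option String
  | [] => (none, none)
  | rt :: rest =>
    let suffix := '_' :: rt
    if PySem.Chars.endswith base suffix then
      (some (String.ofList (PySem.Chars.slice base none (some (-(suffix.length : Int))))),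
       some (String.ofList rt))
    else pmfLoop base rest

def parse_model_filename (filename : String) : Option String × Option String :=
  if !PySem.Str.endswith filename "_model.pkl" then (none, none)
  else
    let base := PySem.Chars.replace filename.toList "_model.pkl".toList []
    pmfLoop base (PySem.List.sorted pmfReadingTypes (fun rt => rt.length) true)

-- ===== PORT B =====
def pmfTable : PySem.Dict Char (List Char) :=
  PySem.Dict.ofList
    [('w', "power_w".toList), ('e', "voltage".toList), ('a', "current_a".toList),
     ('h', "energy_kwh".toList), ('r', "power_factor".toList)]

def pmfAltCore (base : List Char) : Option String × Option String :=
  let rt? : Option (List Char) :=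
    match (if base.isEmpty then none else PySem.List.pyGet? base (-1)) with
    | none => none
    | some c => pmfTable.get? c
  match rt? with
  | some rt =>
    if PySem.Chars.endswith base ('_' :: rt) then
      (some (String.ofList (PySem.Chars.slice base none (some (-(rt.length : Int) - 1)))),
       some (String.ofList rt))
    else (none, none)
  | none => (none, none)

def parse_model_filename_alt (filename : String) : Option String × Option String :=
  if PySem.Str.endswith filename "_model.pkl" then
    pmfAltCore (PySem.Chars.replace filename.toList "_model.pkl".toList [])
  else (none, none)

-- ===== PRECONDITION & SPEC =====
def Spec_parse_model_filename (filename : String) (out : Option String × Option String) : Prop := out = parse_model_filename_alt filename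
instance (filename : String) (out : Option String × Option String) : Decidable (Spec_parse_model_filename filename out) := by unfold Spec_parse_model_filename; infer_instance

-- ===== CLAIM (what is proved, stated in full; the proofs are below) =====
def Claim_equal_parse_model_filename : Prop := ∀ (filename : String), Dom_parse_model_filename filename → Spec_parse_model_filename filename (parse_model_filename filename)

-- ===== LEMMAS AND PROOFS =====

lemma pmf_sorted_eq :
    PySem.List.sorted pmfReadingTypes (fun rt => rt.length) true =
      [['p', 'o', 'w', 'e', 'r', '_', 'f', 'a', 'c', 't', 'o', 'r'], ['e', 'n', 'e', 'r', 'g', 'y', '_', 'k', 'w', 'h'], ['c', 'u', 'r', 'r', 'e', 'n', 't', '_', 'a'], ['p', 'o', 'w', 'e', 'r', '_', 'w'], ['v', 'o', 'l', 't', 'a', 'g', 'e']] := by decide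

lemma pmf_pyGet_neg_one {α : Type} (xs : List α) : PySem.List.pyGet? xs (-1) = xs.getLast? := by
  cases xs with
  | nil => rfl
  | cons a l => simp [PySem.List.pyGet?, PySem.List.pyIdx?, List.getLast?_eq_getElem?]

lemma pmf_last_of_endswith {base p : List Char} (hp : p ≠ [])
    (h : PySem.Chars.endswith base p = true) :
    (if base.isEmpty then (none : Option Char) else PySem.List.pyGet? base (-1)) = p.getLast? := by
  rw [PySem.Chars.endswith_iff] at h
  obtain ⟨t, rfl⟩ := h
  have hne : t ++ p ≠ [] := by simp [hp]
  rw [if_neg (by simpa using hne), pmf_pyGet_neg_one, List.getLast?_append_of_ne_nil t hp]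

lemma pmf_table_mem {c : Char} {rt : List Char} (h : pmfTable.get? c = some rt) :
    rt = ['p', 'o', 'w', 'e', 'r', '_', 'w'] ∨ rt = ['v', 'o', 'l', 't', 'a', 'g', 'e'] ∨ rt = ['c', 'u', 'r', 'r', 'e', 'n', 't', '_', 'a'] ∨ rt = ['e', 'n', 'e', 'r', 'g', 'y', '_', 'k', 'w', 'h'] ∨ rt = ['p', 'o', 'w', 'e', 'r', '_', 'f', 'a', 'c', 't', 'o', 'r'] := by
  have e : pmfTable = PySem.Dict.mk
      [('w', ['p', 'o', 'w', 'e', 'r', '_', 'w']), ('e', ['v', 'o', 'l', 't', 'a', 'g', 'e']), ('a', ['c', 'u', 'r', 'r', 'e', 'n', 't', '_', 'a']), ('h', ['e', 'n', 'e', 'r', 'g', 'y', '_', 'k', 'w', 'h']), ('r', ['p', 'o', 'w', 'e', 'r', '_', 'f', 'a', 'c', 't', 'o', 'r'])] := by decide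
  rw [e] at h
  simp only [PySem.Dict.get?_mk_cons] at h
  split_ifs at h <;> simp_all [PySem.Dict.get?]

lemma pmf_core_eq (base : List Char) :
    pmfLoop base [['p', 'o', 'w', 'e', 'r', '_', 'f', 'a', 'c', 't', 'o', 'r'], ['e', 'n', 'e', 'r', 'g', 'y', '_', 'k', 'w', 'h'], ['c', 'u', 'r', 'r', 'e', 'n', 't', '_', 'a'], ['p', 'o', 'w', 'e', 'r', '_', 'w'], ['v', 'o', 'l', 't', 'a', 'g', 'e']] = pmfAltCore base := by
  simp only [pmfLoop]
  by_cases h1 : PySem.Chars.endswith base ('_' :: ['p', 'o', 'w', 'e', 'r', '_', 'f', 'a', 'c', 't', 'o', 'r']) = true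
  · have hl : (if base.isEmpty then (none : Option Char) else PySem.List.pyGet? base (-1))
        = some 'r' := by rw [pmf_last_of_endswith (by decide) h1]; rfl
    have ht : pmfTable.get? 'r' = some ['p', 'o', 'w', 'e', 'r', '_', 'f', 'a', 'c', 't', 'o', 'r'] := by decide
    simp only [pmfAltCore, hl, ht]
    simp [h1]
  · 
      by_cases h2 : PySem.Chars.endswith base ('_' :: ['e', 'n', 'e', 'r', 'g', 'y', '_', 'k', 'w', 'h']) = true
      · have hl : (if base.isEmpty then (none : Option Char) else PySem.List.pyGet? base (-1))
            = some 'h' := by rw [pmf_last_of_endswith (by decide) h2]; rfl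
        have ht : pmfTable.get? 'h' = some ['e', 'n', 'e', 'r', 'g', 'y', '_', 'k', 'w', 'h'] := by decide
        simp only [pmfAltCore, hl, ht]
        simp [h1, h2]
      · 
          by_cases h3 : PySem.Chars.endswith base ('_' :: ['c', 'u', 'r', 'r', 'e', 'n', 't', '_', 'a']) = true
          · have hl : (if base.isEmpty then (none : Option Char) else PySem.List.pyGet? base (-1))
                = some 'a' := by rw [pmf_last_of_endswith (by decide) h3]; rfl
            have ht : pmfTable.get? 'a' = some ['c', 'u', 'r', 'r', 'e', 'n', 't', '_', 'a'] := by decide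
            simp only [pmfAltCore, hl, ht]
            simp [h1, h2, h3]
          · 
              by_cases h4 : PySem.Chars.endswith base ('_' :: ['p', 'o', 'w', 'e', 'r', '_', 'w']) = true
              · have hl : (if base.isEmpty then (none : Option Char) else PySem.List.pyGet? base (-1))
                    = some 'w' := by rw [pmf_last_of_endswith (by decide) h4]; rfl
                have ht : pmfTable.get? 'w' = some ['p', 'o', 'w', 'e', 'r', '_', 'w'] := by decide
                simp only [pmfAltCore, hl, ht]
                simp [h1, h2, h3, h4]
              · 
                  by_cases h5 : PySem.Chars.endswith base ('_' :: ['v', 'o', 'l', 't', 'a', 'g', 'e']) = true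
                  · have hl : (if base.isEmpty then (none : Option Char) else PySem.List.pyGet? base (-1))
                        = some 'e' := by rw [pmf_last_of_endswith (by decide) h5]; rfl
                    have ht : pmfTable.get? 'e' = some ['v', 'o', 'l', 't', 'a', 'g', 'e'] := by decide
                    simp only [pmfAltCore, hl, ht]
                    simp [h1, h2, h3, h4, h5]
                  · 
                    simp only [pmfAltCore]
                    cases hE : base.isEmpty with
                    | true => simp [h1, h2, h3, h4, h5]
                    | false =>
                      cases hG : PySem.List.pyGet? base (-1) with
                      | none => simp [h1, h2, h3, h4, h5]
                      | some c =>
                        cases hT : pmfTable.get? c with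
                        | none => simp [h1, h2, h3, h4, h5, hT]
                        | some rt =>
                          rcases pmf_table_mem hT with rfl | rfl | rfl | rfl | rfl <;>
                            simp [h1, h2, h3, h4, h5, hT]

-- ===== VERDICT (by name: the statement is the Claim_ definition above) =====
theorem parse_model_filename_spec : Claim_equal_parse_model_filename := by
  intro filename _
  unfold Spec_parse_model_filename parse_model_filename parse_model_filename_alt
  simp only [pmf_sorted_eq]
  cases h : PySem.Chars.endswith filename.toList ['_', 'm', 'o', 'd', 'e', 'l', '.', 'p', 'k', 'l'] <;>
    simp [h, pmf_core_eq]
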